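-- pv_equiv track=rewrite | github.com/benhoff/hws | python/audio_dma_probe.py | half_counts
-- ===== SOURCE A (Python) =====
-- def half_counts(spans: list[tuple[int, int]]) -> tuple[int, int, int]:
--     first = 0
--     second = 0
--     other = 0
--     for start, end in spans:
--         first += max(0, min(end, 4096) - min(start, 4096))
--         second += max(0, min(end, 8192) - max(start, 4096))
--         if end > 8192:
--             other += end - max(start, 8192)
--     return first, second, other
-- ===== SOURCE B (Python) =====
-- def half_counts(spans: list[tuple[int, int]]) -> tuple[int, int, int]:
--     below4 = sum(max(0, min(e, 4096) - min(s, 4096)) for s, e in spans)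
--     below8 = sum(max(0, min(e, 8192) - min(s, 8192)) for s, e in spans)
--     above8 = sum(e - max(s, 8192) for s, e in spans if e > 8192)
--     return below4, below8 - below4, above8
-- ===== Notes on version B (the rewrite author's own statement) =====
-- stated objective: alternative
-- what changed: Replaces the single loop with three running counters and a three-way clamped-overlap formula by three independent comprehension sums of cumulative threshold coverage, obtaining the middle region as the difference below8 - below4 instead of A's direct max(0, min(end,8192) - max(start,4096)) term.
import Mathlib
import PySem

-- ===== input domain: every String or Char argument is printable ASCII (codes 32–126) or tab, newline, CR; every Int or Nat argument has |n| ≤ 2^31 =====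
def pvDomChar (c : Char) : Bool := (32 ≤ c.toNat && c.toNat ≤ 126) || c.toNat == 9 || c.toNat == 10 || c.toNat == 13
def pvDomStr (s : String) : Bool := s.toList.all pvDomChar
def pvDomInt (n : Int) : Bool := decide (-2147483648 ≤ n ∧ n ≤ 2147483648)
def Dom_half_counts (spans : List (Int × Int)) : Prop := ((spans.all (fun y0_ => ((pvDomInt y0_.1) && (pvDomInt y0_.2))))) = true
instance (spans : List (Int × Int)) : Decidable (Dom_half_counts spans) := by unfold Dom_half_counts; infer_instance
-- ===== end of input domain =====

-- B replaces A's single loop (three counters, direct clamped-overlap formulas) by three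
-- independent sums of cumulative threshold coverage, with the middle region as below8 - below4.

-- ===== PORT A =====
def half_counts (spans : List (Int × Int)) : Int × Int × Int :=
  let r := spans.foldl
    (fun (acc : Int × Int × Int) (p : Int × Int) =>
      let start := p.1
      let «end» := p.2
      let first := acc.1 + max 0 (min «end» 4096 - min start 4096)
      let second := acc.2.1 + max 0 (min «end» 8192 - max start 4096)
      let other := if «end» > 8192 then acc.2.2 + («end» - max start 8192) else acc.2.2
      (first, second, other))
    (0, 0, 0)
  r

-- ===== PORT B =====
def half_counts_alt (spans : List (Int × Int)) : Int × Int × Int :=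
  let below4 := (spans.map (fun p => max 0 (min p.2 4096 - min p.1 4096))).sum
  let below8 := (spans.map (fun p => max 0 (min p.2 8192 - min p.1 8192))).sum
  let above8 := ((spans.filter (fun p => p.2 > 8192)).map (fun p => p.2 - max p.1 8192)).sum
  (below4, below8 - below4, above8)

-- ===== PRECONDITION & SPEC =====
def Spec_half_counts (spans : List (Int × Int)) (out : Int × Int × Int) : Prop := out = half_counts_alt spans
instance (spans : List (Int × Int)) (out : Int × Int × Int) : Decidable (Spec_half_counts spans out) := by unfold Spec_half_counts; infer_instance

-- ===== CLAIM (what is proved, stated in full; the proofs are below) =====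
def Claim_equal_half_counts : Prop := ∀ (spans : List (Int × Int)), Dom_half_counts spans → Spec_half_counts spans (half_counts spans)

-- ===== LEMMAS AND PROOFS =====

-- per-span identity: A's middle-region term equals the difference of the two threshold coverages
theorem half_counts_mid_term (s e : Int) :
    max 0 (min e 8192 - max s 4096)
      = max 0 (min e 8192 - min s 8192) - max 0 (min e 4096 - min s 4096) := by
  rcases le_total s 4096 with h1 | h1 <;> rcases le_total e 4096 with h2 | h2 <;>
    rcases le_total s 8192 with h3 | h3 <;> rcases le_total e 8192 with h4 | h4 <;>
    simp [min_def, max_def] <;> split_ifs <;> omega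

-- loop invariant: A's fold from any accumulator adds B's three sums componentwise
theorem half_counts_fold (l : List (Int × Int)) :
    ∀ a b c : Int,
      l.foldl
        (fun (acc : Int × Int × Int) (p : Int × Int) =>
          let start := p.1
          let «end» := p.2
          let first := acc.1 + max 0 (min «end» 4096 - min start 4096)
          let second := acc.2.1 + max 0 (min «end» 8192 - max start 4096)
          let other := if «end» > 8192 then acc.2.2 + («end» - max start 8192) else acc.2.2
          (first, second, other))
        (a, b, c)
      = (a + (l.map (fun p => max 0 (min p.2 4096 - min p.1 4096))).sum,
         b + ((l.map (fun p => max 0 (min p.2 8192 - min p.1 8192))).sum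
              - (l.map (fun p => max 0 (min p.2 4096 - min p.1 4096))).sum),
         c + ((l.filter (fun p => p.2 > 8192)).map (fun p => p.2 - max p.1 8192)).sum) := by
  induction l with
  | nil => intro a b c; simp
  | cons hd tl ih =>
      intro a b c
      simp only [List.foldl_cons, List.map_cons, List.sum_cons, List.filter_cons]
      rw [ih]
      by_cases h : hd.2 > 8192 <;>
        simp [h, half_counts_mid_term hd.1 hd.2, Prod.ext_iff] <;> omega

-- ===== VERDICT (by name: the statement is the Claim_ definition above) =====
theorem half_counts_spec : Claim_equal_half_counts := by
  intro spans _
  show half_counts spans = half_counts_alt spans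
  simp only [half_counts, half_counts_alt]
  rw [half_counts_fold]
  simp
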